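-- pv_equiv track=rewrite | github.com/zhangshv123/superjump | interview/facebook/face/phone/medianOfKSortedArray.py | medianOfKsortedArray
-- ===== SOURCE A (Python) =====
-- import heapq
-- import heapq
--
-- def medianOfKsortedArray(arrs):
--     h = []
--     for arr in arrs:
--         heapq.heappush(h, (arr[0], 0, arr))
--     m = []
--     while len(h) > 0:
--         val, idx, arr = heapq.heappop(h)
--         m.append(val)
--         idx += 1
--         if idx < len(arr):
--             heapq.heappush(h, (arr[idx], idx, arr))
--     return m[int(len(m) / 2)]
-- ===== SOURCE B (Python) =====
-- def medianOfKsortedArray(arrs):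
--     heads = [(arr[0], 0, arr) for arr in arrs]
--     n = sum(len(arr) for arr in arrs)
--     val = None
--     for _ in range(n // 2 + 1):
--         val, i, arr = min(heads)
--         heads.remove((val, i, arr))
--         if i + 1 < len(arr):
--             heads.append((arr[i + 1], i + 1, arr))
--     return val
-- ===== Notes on version B (the rewrite author's own statement) =====
-- stated objective: alternative
-- what changed: B replaces A's heap-based full k-way merge (merge all n elements into a list, then index it) by selection-based merging on a plain list of head triples that stops after n//2+1 extractions, returning the last extracted value directly.
import Mathlib
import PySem

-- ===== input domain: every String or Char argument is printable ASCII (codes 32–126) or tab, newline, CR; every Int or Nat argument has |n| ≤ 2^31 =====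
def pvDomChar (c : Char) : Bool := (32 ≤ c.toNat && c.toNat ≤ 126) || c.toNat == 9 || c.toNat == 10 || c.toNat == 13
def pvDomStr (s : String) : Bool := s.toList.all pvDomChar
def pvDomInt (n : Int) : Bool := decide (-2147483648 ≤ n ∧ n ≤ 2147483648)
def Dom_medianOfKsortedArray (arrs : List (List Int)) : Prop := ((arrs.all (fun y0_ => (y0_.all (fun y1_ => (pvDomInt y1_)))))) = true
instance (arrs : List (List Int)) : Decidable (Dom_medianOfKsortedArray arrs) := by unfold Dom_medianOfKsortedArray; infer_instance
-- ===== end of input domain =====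

-- B changes the algorithm, not the value: selection-based merge stopping after n//2+1 pops instead of
-- A's heap-based full merge; equal return value on every input admitted by Pre_ (where A returns at all).

-- Heap entries are Python tuples (val, idx, arr); Python's tuple `<` is exactly the lexicographic
-- order of the flattened list val :: idx :: arr, for which Lean's `<` on `List Int` is exact.
def pvKey (t : Int × Int × List Int) : List Int := t.1 :: t.2.1 :: t.2.2

-- ===== PORT A =====
-- heapq.heappop returns a minimal entry of the heap; entries tied under `<` are EQUAL tuples here
-- (the comparison ends at the list component), so popping the first minimal entry is exact.
def pvPopMin : List (Int × Int × List Int) → Option ((Int × Int × List Int) × List (Int × Int × List Int))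
  | [] => none
  | x :: xs =>
    match pvPopMin xs with
    | none => some (x, [])
    | some (m, r) => if pvKey m < pvKey x then some (m, x :: r) else some (x, xs)

def pvWt (t : Int × Int × List Int) : Nat := ((t.2.2.length : Int) - t.2.1).toNat
def pvSumWt (h : List (Int × Int × List Int)) : Nat := (h.map pvWt).sum
def pvMeasure (h : List (Int × Int × List Int)) : Nat := pvSumWt h + h.length

-- cited by the termination proofs of pvMergeLoop / pvStream
theorem pvPopMin_cons (x : Int × Int × List Int) (xs : List (Int × Int × List Int)) :
    pvPopMin (x :: xs) = match pvPopMin xs with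
      | none => some (x, [])
      | some (m, r) => if pvKey m < pvKey x then some (m, x :: r) else some (x, xs) := rfl

theorem pvPopMin_none {h : List (Int × Int × List Int)} : pvPopMin h = none ↔ h = [] := by
  cases h with
  | nil => simp [pvPopMin]
  | cons x xs =>
    rw [pvPopMin_cons]
    split
    · simp
    · split <;> simp

theorem pvPopMin_perm : ∀ {h : List (Int × Int × List Int)} {t r}, pvPopMin h = some (t, r) → h.Perm (t :: r) := by
  intro h
  induction h with
  | nil => intro t r hp; simp [pvPopMin] at hp
  | cons x xs ih =>
    intro t r hp
    rw [pvPopMin_cons] at hp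
    split at hp
    · rename_i hx
      rw [pvPopMin_none.mp hx] at *
      simp at hp
      obtain ⟨rfl, rfl⟩ := hp
      exact List.Perm.refl _
    · rename_i m r' hx
      split at hp
      · injection hp with hp
        simp only [Prod.mk.injEq] at hp
        obtain ⟨rfl, rfl⟩ := hp
        exact ((ih hx).cons x).trans (List.Perm.swap m x r')
      · injection hp with hp
        simp only [Prod.mk.injEq] at hp
        obtain ⟨rfl, rfl⟩ := hp
        exact List.Perm.refl _

theorem pvMeasure_popMin {h : List (Int × Int × List Int)} {t r} (hp : pvPopMin h = some (t, r)) :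
    pvSumWt h = pvWt t + pvSumWt r ∧ h.length = r.length + 1 := by
  have hperm := pvPopMin_perm hp
  constructor
  · have := (hperm.map pvWt).sum_eq
    simpa [pvSumWt] using this
  · simpa using hperm.length_eq

-- the while-loop of A: pop the minimum, append its value to m, push the array's next element
def pvMergeLoop (h : List (Int × Int × List Int)) (m : List Int) : List Int :=
  match hp : pvPopMin h with
  | none => m
  | some ((v, i, arr), r) =>
    if hlt : i + 1 < (arr.length : Int) then
      pvMergeLoop ((PySem.List.pyGetD arr (i + 1) 0, i + 1, arr) :: r) (m ++ [v])
    else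
      pvMergeLoop r (m ++ [v])
termination_by pvMeasure h
decreasing_by
  · obtain ⟨hs, hl⟩ := pvMeasure_popMin hp
    simp only [pvMeasure, pvSumWt, List.map_cons, List.sum_cons, List.length_cons] at *
    have : pvWt (PySem.List.pyGetD arr (i + 1) 0, i + 1, arr) + 1 = pvWt (v, i, arr) := by
      first | (rw [show pvWt (PySem.List.pyGetD arr (i + 1) 0, i + 1, arr) = ((arr.length : Int) - (i + 1)).toNat from rfl, show pvWt (v, i, arr) = ((arr.length : Int) - i).toNat from rfl]; omega) | (rw [show pvWt (v, i, arr) = ((arr.length : Int) - i).toNat from rfl]; omega)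
    omega
  · obtain ⟨hs, hl⟩ := pvMeasure_popMin hp
    simp only [pvMeasure] at *; omega

-- A: build the heap of (arr[0], 0, arr), merge everything into m, return m[int(len(m)/2)].
-- arr[0] on an empty arr and m[...] on empty m raise in Python (outside Pre_): pyGetD's default is junk there.
-- int(len(m)/2) is floor division for these sizes.
def medianOfKsortedArray (arrs : List (List Int)) : Int :=
  let h := arrs.foldl (fun h arr => (PySem.List.pyGetD arr 0 0, (0 : Int), arr) :: h) []
  let m := pvMergeLoop h []
  PySem.List.pyGetD m (PySem.Int.floordiv (m.length : Int) 2) 0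

-- ===== PORT B =====
-- one iteration of B's for-loop: take min(heads) (Python's tuple `<` = lex order of pvKey, first
-- minimal element), remove it, append the source array's next head if any; min([]) raises (outside Pre_)
def pvBStep (s : List (Int × Int × List Int) × Int) : List (Int × Int × List Int) × Int :=
  match PySem.List.min? s.1 pvKey with
  | none => s
  | some t =>
    let heads1 := (PySem.List.remove? s.1 t).getD s.1
    match t with
    | (v, i, arr) =>
      (if i + 1 < (arr.length : Int) then heads1 ++ [(PySem.List.pyGetD arr (i + 1) 0, i + 1, arr)] else heads1, v)

def medianOfKsortedArray_alt (arrs : List (List Int)) : Int :=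
  let heads := arrs.map (fun arr => ((PySem.List.pyGetD arr 0 0 : Int), (0 : Int), arr))
  let n := arrs.foldl (fun s arr => s + arr.length) 0
  ((List.range (n / 2 + 1)).foldl (fun s _ => pvBStep s) (heads, 0)).2

-- ===== PRECONDITION & SPEC =====
-- Pre_ excludes exactly the inputs on which Python A raises: an empty arrs (IndexError on m[0])
-- and any empty inner array (IndexError on arr[0]).
def Pre_medianOfKsortedArray (arrs : List (List Int)) : Prop := arrs ≠ [] ∧ ∀ a ∈ arrs, a ≠ []
instance (arrs : List (List Int)) : Decidable (Pre_medianOfKsortedArray arrs) := by unfold Pre_medianOfKsortedArray; infer_instance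
def pvWitness_medianOfKsortedArray : List (List Int) := [[1, 3], [2]]

def Spec_medianOfKsortedArray (arrs : List (List Int)) (out : Int) : Prop := out = medianOfKsortedArray_alt arrs
instance (arrs : List (List Int)) (out : Int) : Decidable (Spec_medianOfKsortedArray arrs out) := by unfold Spec_medianOfKsortedArray; infer_instance

-- ===== CLAIM (what is proved, stated in full; the proofs are below) =====
def Claim_equal_medianOfKsortedArray : Prop := ∀ (arrs : List (List Int)), Dom_medianOfKsortedArray arrs → Pre_medianOfKsortedArray arrs → Spec_medianOfKsortedArray arrs (medianOfKsortedArray arrs)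

-- ===== LEMMAS AND PROOFS =====

theorem pvKey_inj {a b : Int × Int × List Int} (h : pvKey a = pvKey b) : a = b := by
  obtain ⟨a1, a2, a3⟩ := a; obtain ⟨b1, b2, b3⟩ := b
  simp [pvKey] at h; simp [h.1, h.2.1, h.2.2]

theorem pvPopMin_min : ∀ {h : List (Int × Int × List Int)} {t r}, pvPopMin h = some (t, r) →
    ∀ u ∈ h, pvKey t ≤ pvKey u := by
  intro h
  induction h with
  | nil => intro t r hp; simp [pvPopMin] at hp
  | cons x xs ih =>
    intro t r hp u hu
    rw [pvPopMin_cons] at hp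
    split at hp
    · rename_i hx
      obtain rfl := pvPopMin_none.mp hx
      simp at hp hu
      obtain ⟨rfl, rfl⟩ := hp
      rw [hu]
    · rename_i m r' hx
      split at hp
      · rename_i hlt
        injection hp with hp
        simp only [Prod.mk.injEq] at hp
        obtain ⟨rfl, rfl⟩ := hp
        rcases List.mem_cons.mp hu with rfl | hu
        · exact le_of_lt hlt
        · exact ih hx u hu
      · rename_i hnlt
        injection hp with hp
        simp only [Prod.mk.injEq] at hp
        obtain ⟨rfl, rfl⟩ := hp
        rcases List.mem_cons.mp hu with rfl | hu
        · exact le_refl _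
        · exact le_trans (not_lt.mp hnlt) (ih hx u hu)

theorem pvRemove_none : ∀ {l : List (Int × Int × List Int)} {t},
    PySem.List.remove? l t = none → t ∉ l := by
  intro l
  induction l with
  | nil => intro t _ hm; simp at hm
  | cons x xs ih =>
    intro t hp hm
    by_cases hx : x = t
    · subst hx
      rw [PySem.List.remove?_cons_self] at hp
      cases hp
    · rw [PySem.List.remove?_cons_of_ne xs hx] at hp
      rcases List.mem_cons.mp hm with rfl | hm
      · exact hx rfl
      · exact ih (by cases hq : PySem.List.remove? xs t with
          | none => rfl
          | some r0 => rw [hq] at hp; simp at hp) hm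

theorem pvRemove_perm : ∀ {l : List (Int × Int × List Int)} {t r},
    PySem.List.remove? l t = some r → l.Perm (t :: r) := by
  intro l
  induction l with
  | nil => intro t r hp; simp [PySem.List.remove?] at hp
  | cons x xs ih =>
    intro t r hp
    by_cases hx : x = t
    · subst hx
      rw [PySem.List.remove?_cons_self] at hp
      injection hp with hp; cases hp
      exact List.Perm.refl _
    · rw [PySem.List.remove?_cons_of_ne xs hx] at hp
      cases hq : PySem.List.remove? xs t with
      | none => rw [hq] at hp; simp at hp
      | some r0 =>
        rw [hq] at hp
        simp at hp; cases hp
        exact ((ih hq).cons x).trans (List.Perm.swap _ _ _)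

def pvStream (h : List (Int × Int × List Int)) : List Int :=
  match hp : pvPopMin h with
  | none => []
  | some ((v, i, arr), r) =>
    v :: pvStream (if i + 1 < (arr.length : Int) then (PySem.List.pyGetD arr (i + 1) 0, i + 1, arr) :: r else r)
termination_by pvMeasure h
decreasing_by
  obtain ⟨hs, hl⟩ := pvMeasure_popMin hp
  split
  · rename_i hlt
    simp only [pvMeasure, pvSumWt, List.map_cons, List.sum_cons, List.length_cons] at *
    have : pvWt (PySem.List.pyGetD arr (i + 1) 0, i + 1, arr) + 1 = pvWt (v, i, arr) := by
      first | (rw [show pvWt (PySem.List.pyGetD arr (i + 1) 0, i + 1, arr) = ((arr.length : Int) - (i + 1)).toNat from rfl, show pvWt (v, i, arr) = ((arr.length : Int) - i).toNat from rfl]; omega) | (rw [show pvWt (v, i, arr) = ((arr.length : Int) - i).toNat from rfl]; omega)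
    omega
  · simp only [pvMeasure] at *; omega

theorem pvStream_nil : pvStream [] = [] := by
  rw [pvStream]
  split
  · rfl
  · rename_i v i arr r hq
    simp [pvPopMin] at hq

theorem pvStream_cons {h : List (Int × Int × List Int)} {v i arr r}
    (hp : pvPopMin h = some ((v, i, arr), r)) :
    pvStream h = v :: pvStream (if i + 1 < (arr.length : Int) then (PySem.List.pyGetD arr (i + 1) 0, i + 1, arr) :: r else r) := by
  rw [pvStream]
  split
  · rename_i hq; rw [hq] at hp; cases hp
  · rename_i v' i' arr' r' hq
    rw [hq] at hp
    injection hp with hp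
    obtain ⟨h1, h2, h3, h4⟩ : v' = v ∧ i' = i ∧ arr' = arr ∧ r' = r := by
      have := hp; simp at this; tauto
    subst h1; subst h2; subst h3; subst h4
    rfl

theorem pvMergeLoop_eq : ∀ (n : Nat) (h : List (Int × Int × List Int)), pvMeasure h ≤ n →
    ∀ m, pvMergeLoop h m = m ++ pvStream h := by
  intro n
  induction n with
  | zero =>
    intro h hle m
    have : h = [] := by
      cases h with
      | nil => rfl
      | cons x xs => simp [pvMeasure] at hle
    subst this
    rw [pvStream_nil, pvMergeLoop]
    split
    · simp
    · rename_i v i arr r hq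
      simp [pvPopMin] at hq
  | succ n ih =>
    intro h hle m
    rw [pvMergeLoop]
    split
    · rename_i hq
      rw [pvPopMin_none.mp hq, pvStream_nil]; simp
    · rename_i v i arr r hq
      rw [pvStream_cons hq]
      obtain ⟨hs, hl⟩ := pvMeasure_popMin hq
      split
      · rename_i hlt
        have hm : pvMeasure ((PySem.List.pyGetD arr (i + 1) 0, i + 1, arr) :: r) ≤ n := by
          simp only [pvMeasure, pvSumWt, List.map_cons, List.sum_cons, List.length_cons] at *
          have : pvWt (PySem.List.pyGetD arr (i + 1) 0, i + 1, arr) + 1 = pvWt (v, i, arr) := by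
            first | (rw [show pvWt (PySem.List.pyGetD arr (i + 1) 0, i + 1, arr) = ((arr.length : Int) - (i + 1)).toNat from rfl, show pvWt (v, i, arr) = ((arr.length : Int) - i).toNat from rfl]; omega) | (rw [show pvWt (v, i, arr) = ((arr.length : Int) - i).toNat from rfl]; omega)
          omega
        rw [ih _ hm]; simp
      · rename_i hlt
        have hm : pvMeasure r ≤ n := by simp only [pvMeasure] at *; omega
        rw [ih _ hm]; simp

theorem pvStream_perm : ∀ (n : Nat) (h₁ h₂ : List (Int × Int × List Int)), pvMeasure h₁ ≤ n →
    h₁.Perm h₂ → pvStream h₁ = pvStream h₂ := by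
  intro n
  induction n with
  | zero =>
    intro h₁ h₂ hle hperm
    have h1 : h₁ = [] := by
      cases h₁ with
      | nil => rfl
      | cons x xs => simp [pvMeasure] at hle
    subst h1
    rw [hperm.symm.eq_nil]
  | succ n ih =>
    intro h₁ h₂ hle hperm
    cases hq1 : pvPopMin h₁ with
    | none =>
      rw [pvPopMin_none.mp hq1] at hperm ⊢
      rw [hperm.symm.eq_nil]
    | some tr =>
      obtain ⟨⟨v, i, arr⟩, r⟩ := tr
      cases hq2 : pvPopMin h₂ with
      | none =>
        rw [pvPopMin_none.mp hq2] at hperm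
        rw [hperm.eq_nil] at hq1
        simp [pvPopMin] at hq1
      | some tr2 =>
        obtain ⟨⟨v2, i2, arr2⟩, r2⟩ := tr2
        have hmem1 : ((v, i, arr) : Int × Int × List Int) ∈ h₁ := (pvPopMin_perm hq1).mem_iff.mpr (by simp)
        have hmem2 : ((v2, i2, arr2) : Int × Int × List Int) ∈ h₂ := (pvPopMin_perm hq2).mem_iff.mpr (by simp)
        have hle1 : pvKey (v, i, arr) ≤ pvKey (v2, i2, arr2) := pvPopMin_min hq1 _ (hperm.mem_iff.mpr hmem2)
        have hle2 : pvKey (v2, i2, arr2) ≤ pvKey (v, i, arr) := pvPopMin_min hq2 _ (hperm.mem_iff.mp hmem1)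
        have heq : ((v, i, arr) : Int × Int × List Int) = (v2, i2, arr2) := pvKey_inj (le_antisymm hle1 hle2)
        obtain ⟨he1, he2, he3⟩ : v = v2 ∧ i = i2 ∧ arr = arr2 := by
          have := heq; simp at this; tauto
        subst he1; subst he2; subst he3
        have hrperm : r.Perm r2 := by
          have p1 := (pvPopMin_perm hq1).symm.trans (hperm.trans (pvPopMin_perm hq2))
          exact p1.cons_inv
        rw [pvStream_cons hq1, pvStream_cons hq2]
        obtain ⟨hs, hl⟩ := pvMeasure_popMin hq1
        congr 1
        by_cases hlt : i + 1 < (arr.length : Int)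
        · rw [if_pos hlt, if_pos hlt]
          apply ih
          · simp only [pvMeasure, pvSumWt, List.map_cons, List.sum_cons, List.length_cons] at *
            have : pvWt (PySem.List.pyGetD arr (i + 1) 0, i + 1, arr) + 1 = pvWt (v, i, arr) := by
              first | (rw [show pvWt (PySem.List.pyGetD arr (i + 1) 0, i + 1, arr) = ((arr.length : Int) - (i + 1)).toNat from rfl, show pvWt (v, i, arr) = ((arr.length : Int) - i).toNat from rfl]; omega) | (rw [show pvWt (v, i, arr) = ((arr.length : Int) - i).toNat from rfl]; omega)
            omega
          · exact hrperm.cons _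
        · rw [if_neg hlt, if_neg hlt]
          apply ih
          · simp only [pvMeasure] at *; omega
          · exact hrperm

def pvValid (h : List (Int × Int × List Int)) : Prop := ∀ t ∈ h, 0 ≤ t.2.1 ∧ t.2.1 < (t.2.2.length : Int)

theorem pvStream_length : ∀ (n : Nat) (h : List (Int × Int × List Int)), pvMeasure h ≤ n →
    pvValid h → (pvStream h).length = pvSumWt h := by
  intro n
  induction n with
  | zero =>
    intro h hle hv
    have : h = [] := by
      cases h with
      | nil => rfl
      | cons x xs => simp [pvMeasure] at hle
    subst this
    simp [pvStream_nil, pvSumWt]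
  | succ n ih =>
    intro h hle hv
    cases hq : pvPopMin h with
    | none =>
      rw [pvPopMin_none.mp hq]
      simp [pvStream_nil, pvSumWt]
    | some tr =>
      obtain ⟨⟨v, i, arr⟩, r⟩ := tr
      rw [pvStream_cons hq]
      obtain ⟨hs, hl⟩ := pvMeasure_popMin hq
      have hperm := pvPopMin_perm hq
      have hvr : pvValid r := fun t ht => hv t (hperm.mem_iff.mpr (by simp [ht]))
      have hvt := hv (v, i, arr) (hperm.mem_iff.mpr (by simp))
      simp only at hvt
      by_cases hlt : i + 1 < (arr.length : Int)
      · rw [if_pos hlt]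
        have hvn : pvValid ((PySem.List.pyGetD arr (i + 1) 0, i + 1, arr) :: r) := by
          intro t ht
          rcases List.mem_cons.mp ht with ht | ht
          · subst ht; exact ⟨show (0:Int) ≤ i + 1 by omega, show (i+1:Int) < ((arr.length:Int)) from hlt⟩
          · exact hvr t ht
        have hm : pvMeasure ((PySem.List.pyGetD arr (i + 1) 0, i + 1, arr) :: r) ≤ n := by
          simp only [pvMeasure, pvSumWt, List.map_cons, List.sum_cons, List.length_cons] at *
          have : pvWt (PySem.List.pyGetD arr (i + 1) 0, i + 1, arr) + 1 = pvWt (v, i, arr) := by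
            first | (rw [show pvWt (PySem.List.pyGetD arr (i + 1) 0, i + 1, arr) = ((arr.length : Int) - (i + 1)).toNat from rfl, show pvWt (v, i, arr) = ((arr.length : Int) - i).toNat from rfl]; omega) | (rw [show pvWt (v, i, arr) = ((arr.length : Int) - i).toNat from rfl]; omega)
          omega
        rw [List.length_cons, ih _ hm hvn]
        simp only [pvSumWt, List.map_cons, List.sum_cons] at *
        have : pvWt (PySem.List.pyGetD arr (i + 1) 0, i + 1, arr) + 1 = pvWt (v, i, arr) := by
          first | (rw [show pvWt (PySem.List.pyGetD arr (i + 1) 0, i + 1, arr) = ((arr.length : Int) - (i + 1)).toNat from rfl, show pvWt (v, i, arr) = ((arr.length : Int) - i).toNat from rfl]; omega) | (rw [show pvWt (v, i, arr) = ((arr.length : Int) - i).toNat from rfl]; omega)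
        omega
      · rw [if_neg hlt]
        have hm : pvMeasure r ≤ n := by simp only [pvMeasure] at *; omega
        rw [List.length_cons, ih _ hm hvr]
        simp only [pvSumWt, List.map_cons, List.sum_cons] at *
        have : pvWt (v, i, arr) = 1 := by first | (rw [show pvWt (PySem.List.pyGetD arr (i + 1) 0, i + 1, arr) = ((arr.length : Int) - (i + 1)).toNat from rfl, show pvWt (v, i, arr) = ((arr.length : Int) - i).toNat from rfl]; omega) | (rw [show pvWt (v, i, arr) = ((arr.length : Int) - i).toNat from rfl]; omega)
        omega

-- one B-iteration simulates one A-pop: same emitted value, permuted successor states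
theorem pvBStep_sim (h heads : List (Int × Int × List Int)) (d : Int)
    (hv : pvValid h) (hne : h ≠ []) (hperm : heads.Perm h) :
    ∃ h', (pvBStep (heads, d)).1.Perm h' ∧ pvValid h' ∧ pvSumWt h' + 1 = pvSumWt h ∧
      pvStream h = (pvBStep (heads, d)).2 :: pvStream h' := by
  cases hq : pvPopMin h with
  | none => exact absurd (pvPopMin_none.mp hq) hne
  | some tr =>
    obtain ⟨⟨v, i, arr⟩, r⟩ := tr
    have hpermA := pvPopMin_perm hq
    have hmemA : ((v, i, arr) : Int × Int × List Int) ∈ heads := hperm.mem_iff.mpr (hpermA.mem_iff.mpr (by simp))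
    have hheadsne : heads ≠ [] := by
      intro hnil; rw [hnil] at hmemA; simp at hmemA
    cases hmin : PySem.List.min? heads pvKey with
    | none => exact absurd ((PySem.List.min?_eq_none_iff heads pvKey).mp hmin) hheadsne
    | some t =>
      have htmem : t ∈ heads := PySem.List.min?_mem hmin
      have hmin2 : @PySem.List.min? _ _ _ (@LinearOrder.toDecidableLT _ List.instLinearOrder) heads pvKey = some t := by
        convert hmin using 2
      have ht1 : pvKey t ≤ pvKey (v, i, arr) := PySem.List.min?_isMin hmin2 _ hmemA
      have ht2 : pvKey (v, i, arr) ≤ pvKey t := pvPopMin_min hq _ (hperm.mem_iff.mp htmem)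
      have hteq : t = ((v, i, arr) : Int × Int × List Int) := pvKey_inj (le_antisymm ht1 ht2)
      subst hteq
      cases hrem : PySem.List.remove? heads ((v, i, arr) : Int × Int × List Int) with
      | none => exact absurd hmemA (pvRemove_none hrem)
      | some r' =>
        have hpermR : r'.Perm r := by
          have p1 : (((v, i, arr) : Int × Int × List Int) :: r').Perm (((v, i, arr) : Int × Int × List Int) :: r) :=
            (pvRemove_perm hrem).symm.trans (hperm.trans hpermA)
          exact p1.cons_inv
        obtain ⟨hs, hl⟩ := pvMeasure_popMin hq
        have hvr : pvValid r := fun u hu => hv u (hpermA.mem_iff.mpr (by simp [hu]))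
        have hvt := hv (v, i, arr) (hpermA.mem_iff.mpr (by simp))
        simp only at hvt
        by_cases hlt : i + 1 < (arr.length : Int)
        · refine ⟨(PySem.List.pyGetD arr (i + 1) 0, i + 1, arr) :: r, ?_, ?_, ?_, ?_⟩
          · simp only [pvBStep, hmin, hrem, Option.getD_some, if_pos hlt]
            exact (List.perm_append_singleton _ _).trans (hpermR.cons _)
          · intro u hu
            rcases List.mem_cons.mp hu with hu | hu
            · subst hu; exact ⟨show (0:Int) ≤ i + 1 by omega, show (i+1:Int) < ((arr.length:Int)) from hlt⟩
            · exact hvr u hu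
          · have e1 : pvWt (PySem.List.pyGetD arr (i + 1) 0, i + 1, arr) = ((arr.length : Int) - (i + 1)).toNat := rfl
            have e2 : pvWt (v, i, arr) = ((arr.length : Int) - i).toNat := rfl
            simp only [pvSumWt, List.map_cons, List.sum_cons, e1, e2] at *
            omega
          · rw [pvStream_cons hq, if_pos hlt]
            simp [pvBStep, hmin, hrem]
        · refine ⟨r, ?_, hvr, ?_, ?_⟩
          · simp only [pvBStep, hmin, hrem, Option.getD_some, if_neg hlt]
            exact hpermR
          · have : pvWt (v, i, arr) = 1 := by first | (rw [show pvWt (PySem.List.pyGetD arr (i + 1) 0, i + 1, arr) = ((arr.length : Int) - (i + 1)).toNat from rfl, show pvWt (v, i, arr) = ((arr.length : Int) - i).toNat from rfl]; omega) | (rw [show pvWt (v, i, arr) = ((arr.length : Int) - i).toNat from rfl]; omega)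
            omega
          · rw [pvStream_cons hq, if_neg hlt]
            simp [pvBStep, hmin, hrem]

def pvIter : Nat → List (Int × Int × List Int) × Int → List (Int × Int × List Int) × Int
  | 0, s => s
  | n + 1, s => pvIter n (pvBStep s)

theorem pvFoldl_iter (l : List Nat) (s : List (Int × Int × List Int) × Int) :
    l.foldl (fun s _ => pvBStep s) s = pvIter l.length s := by
  induction l generalizing s with
  | nil => rfl
  | cons x xs ih => simp [List.foldl_cons, pvIter, ih]

theorem pvLoop_sim : ∀ (k : Nat) (h heads : List (Int × Int × List Int)) (d : Int),
    pvValid h → heads.Perm h → k < pvSumWt h →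
    (pvIter (k + 1) (heads, d)).2 = (pvStream h).getD k 0 := by
  intro k
  induction k with
  | zero =>
    intro h heads d hv hperm hk
    have hne : h ≠ [] := by
      intro hnil; subst hnil; simp [pvSumWt] at hk
    obtain ⟨h', _, _, _, hstream⟩ := pvBStep_sim h heads d hv hne hperm
    simp [pvIter, hstream]
  | succ k ih =>
    intro k' heads d hv hperm hk
    have hne : k' ≠ [] := by
      intro hnil; subst hnil; simp [pvSumWt] at hk
    obtain ⟨h', hperm', hv', hsum, hstream⟩ := pvBStep_sim k' heads d hv hne hperm
    have hstep : pvIter (k + 2) (heads, d) = pvIter (k + 1) (pvBStep (heads, d)) := rfl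
    rw [hstep]
    have hk' : k < pvSumWt h' := by omega
    have hmain := ih h' (pvBStep (heads, d)).1 (pvBStep (heads, d)).2 hv' hperm' hk'
    rw [hstream]
    simpa using hmain

theorem pvFoldCons (arrs : List (List Int)) (acc : List (Int × Int × List Int)) :
    arrs.foldl (fun h arr => (PySem.List.pyGetD arr 0 0, (0 : Int), arr) :: h) acc
      = (arrs.map (fun arr => ((PySem.List.pyGetD arr 0 0 : Int), (0 : Int), arr))).reverse ++ acc := by
  induction arrs generalizing acc with
  | nil => simp
  | cons a as ih => simp [List.foldl_cons, ih]

theorem pvFoldLen (arrs : List (List Int)) (acc : Nat) :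
    arrs.foldl (fun s arr => s + arr.length) acc = acc + (arrs.map List.length).sum := by
  induction arrs generalizing acc with
  | nil => simp
  | cons a as ih => simp [List.foldl_cons, ih]; omega

theorem pvSumWt_heads (arrs : List (List Int)) :
    pvSumWt (arrs.map (fun arr => ((PySem.List.pyGetD arr 0 0 : Int), (0 : Int), arr))) = (arrs.map List.length).sum := by
  induction arrs with
  | nil => simp [pvSumWt]
  | cons a as ih =>
    simp only [List.map_cons, pvSumWt, List.sum_cons] at *
    have e : pvWt (PySem.List.pyGetD a 0 0, (0 : Int), a) = ((a.length : Int) - 0).toNat := rfl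
    omega

theorem pvFloordiv_nat (n : Nat) : PySem.Int.floordiv (n : Int) 2 = ((n / 2 : Nat) : Int) := by
  rw [PySem.Int.floordiv, Int.fdiv_eq_ediv]
  push_cast; rfl

-- ===== VERDICT (by name: the statement is the Claim_ definition above) =====
theorem medianOfKsortedArray_spec : Claim_equal_medianOfKsortedArray := by
  intro arrs _ hpre
  obtain ⟨hne, hnonempty⟩ := hpre
  unfold Spec_medianOfKsortedArray medianOfKsortedArray medianOfKsortedArray_alt
  simp only []
  set heads := arrs.map (fun arr => ((PySem.List.pyGetD arr 0 0 : Int), (0 : Int), arr)) with hheads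
  set n := (arrs.map List.length).sum with hn
  -- the initial heap is a permutation of B's heads list
  have hfold : arrs.foldl (fun h arr => (PySem.List.pyGetD arr 0 0, (0 : Int), arr) :: h) [] = heads.reverse := by
    rw [pvFoldCons]; simp; rfl
  have hperm : heads.reverse.Perm heads := List.reverse_perm heads
  have hvalid : pvValid heads := by
    intro t ht
    rw [hheads] at ht
    obtain ⟨arr, harr, hteq⟩ := List.mem_map.mp ht
    subst hteq
    have : arr ≠ [] := hnonempty arr harr
    constructor
    · simp
    · simp only
      have : 0 < arr.length := List.length_pos_iff.mpr this
      exact_mod_cast this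
  have hsum : pvSumWt heads = n := pvSumWt_heads arrs
  have hvalidRev : pvValid heads.reverse := fun t ht => hvalid t (hperm.mem_iff.mp ht)
  have hn1 : 1 ≤ n := by
    cases arrs with
    | nil => exact absurd rfl hne
    | cons a as =>
      have : a ≠ [] := hnonempty a (by simp)
      have : 0 < a.length := List.length_pos_iff.mpr this
      simp only [hn, List.map_cons, List.sum_cons]
      omega
  -- A's merged list is the pop stream of the heads
  have hm : pvMergeLoop heads.reverse [] = pvStream heads := by
    rw [pvMergeLoop_eq (pvMeasure heads.reverse) _ (le_refl _)]
    rw [pvStream_perm (pvMeasure heads.reverse) _ _ (le_refl _) hperm]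
    simp
  have hlen : (pvStream heads).length = n := by
    rw [pvStream_length (pvMeasure heads) _ (le_refl _) hvalid, hsum]
  -- B's fold over range(n/2+1)
  have hfold2 : arrs.foldl (fun s arr => s + arr.length) 0 = n := by
    rw [pvFoldLen]; omega
  rw [hfold, hm, hfold2, hlen, pvFoldl_iter]
  rw [pvFloordiv_nat, PySem.List.pyGetD_natCast]
  rw [List.length_range]
  have := pvLoop_sim (n / 2) heads heads 0 hvalid (List.Perm.refl _) (by omega)
  rw [this]
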